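-- pv_equiv track=rewrite | github.com/rowanhm/cygnet | cyg/converters.py | _encode_for_xml_id
-- ===== SOURCE A (Python) =====
-- def _encode_for_xml_id(text: str) -> str:
--     """
--     Convert any Unicode string to a safe XML ID format with one-to-one correspondence.
--     Each unique input string produces a unique output key.
--
--     Encoding rules:
--     - ASCII letters (a-z, A-Z): pass through unchanged
--     - ASCII digits (0-9): pass through unchanged
--     - Everything else (including punctuation, spaces, non-ASCII Unicode):
--       encode as xHHHH where HHHH is the 4-digit uppercase hex Unicode codepoint
--     """
--     encoded = []
--     for char in text:
--         # Only allow ASCII alphanumeric (a-z, A-Z, 0-9)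
--         if ('a' <= char <= 'z') or ('A' <= char <= 'Z') or ('0' <= char <= '9'):
--             encoded.append(char)
--         else:
--             # Encode everything else as x followed by 4-digit hex codepoint
--             hex_val = f"{ord(char):04X}"
--             encoded.append(f"x{hex_val}")
--     return ''.join(encoded)
-- ===== SOURCE B (Python) =====
-- # Run-based two-pointer scan: copy each maximal ASCII-alphanumeric run through
-- # as one whole slice, encode each other character individually as x%04X.
-- def _encode_for_xml_id(text: str) -> str:
--     pieces = []
--     i, n = 0, len(text)
--     while i < n:
--         j = i
--         while j < n and text[j].isascii() and text[j].isalnum():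
--             j += 1
--         if j > i:
--             pieces.append(text[i:j])
--             i = j
--         else:
--             pieces.append("x%04X" % ord(text[i]))
--             i += 1
--     return ''.join(pieces)
-- ===== Notes on version B (the rewrite author's own statement) =====
-- stated objective: alternative
-- what changed: Replaces A's per-character append-with-branch loop by a two-pointer run scanner: an inner pointer advances over each maximal ASCII-alphanumeric run which is copied through as one slice, and only the single characters between runs are hex-encoded.
import Mathlib
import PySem

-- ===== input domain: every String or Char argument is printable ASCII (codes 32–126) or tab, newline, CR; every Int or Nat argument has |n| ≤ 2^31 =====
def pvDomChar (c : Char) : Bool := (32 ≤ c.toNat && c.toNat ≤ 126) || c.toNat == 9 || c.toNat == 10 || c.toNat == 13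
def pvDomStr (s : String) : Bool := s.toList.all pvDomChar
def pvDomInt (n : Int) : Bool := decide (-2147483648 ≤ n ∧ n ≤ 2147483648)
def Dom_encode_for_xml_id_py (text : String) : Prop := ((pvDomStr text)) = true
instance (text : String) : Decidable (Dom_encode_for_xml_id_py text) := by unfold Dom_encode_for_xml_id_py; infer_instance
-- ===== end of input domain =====

-- B replaces A's per-character append-with-branch loop by a two-pointer run scanner
-- (maximal alphanumeric runs copied through as whole slices); objective: alternative.

-- ===== PORT A =====
-- f"{n:04X}": uppercase hex digits of n, left-padded with '0' to width 4 (exact for all n ≥ 0).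
def pvHexDigit (n : Nat) : Char := if n < 10 then Char.ofNat (48 + n) else Char.ofNat (55 + n)

-- structural recursion on a fuel bound (n/16 < n), so the kernel can evaluate it
def pvHexDigitsAux : Nat → Nat → List Char
  | 0, _ => []
  | fuel + 1, n => if n = 0 then [] else pvHexDigitsAux fuel (n / 16) ++ [pvHexDigit (n % 16)]

def pvHexDigits (n : Nat) : List Char := pvHexDigitsAux n n

def pvHex4 (n : Nat) : List Char :=
  let ds := if n = 0 then ['0'] else pvHexDigits n
  List.replicate (4 - ds.length) '0' ++ ds

-- Python strings handled inside the function are represented as List Char (PySem's own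
-- representation; String.ofList at the boundary), since Lean's String internals are opaque.
def encode_for_xml_id_py (text : String) : String :=
  let encoded : List (List Char) := text.toList.foldl (fun acc char =>
    if (('a' ≤ char ∧ char ≤ 'z') ∨ ('A' ≤ char ∧ char ≤ 'Z') ∨ ('0' ≤ char ∧ char ≤ '9'))
    then acc ++ [[char]]
    else acc ++ ['x' :: pvHex4 char.toNat]) []
  String.ofList (PySem.Chars.join [] encoded)

-- ===== PORT B =====
-- 'text[j].isascii() and text[j].isalnum()': isascii() is exactly ord(c) ≤ 127;
-- isalnum() on an ASCII char is exactly PySem.Chars.isalnum.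
def pvAln (c : Char) : Bool := decide (c.toNat ≤ 127) && PySem.Chars.isalnum c

-- the two-pointer while loop over indices i < j, written over the suffix text[i:]:
-- the inner 'while j < n and aln(text[j]): j += 1' computes j - i = length of the
-- alphanumeric prefix of the suffix (takeWhile), the slice text[i:j] is that prefix,
-- and 'i = j' / 'i += 1' continues on the rest (dropWhile / tail).
def pvBGo : List Char → List (List Char)
  | [] => []
  | c :: cs =>
      if 0 < (List.takeWhile pvAln (c :: cs)).length then
        List.takeWhile pvAln (c :: cs) :: pvBGo (List.dropWhile pvAln (c :: cs))
      else
        ('x' :: pvHex4 c.toNat) :: pvBGo cs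
termination_by l => l.length
decreasing_by
  · have h := congrArg List.length (List.takeWhile_append_dropWhile (p := pvAln) (l := c :: cs))
    simp only [List.length_append, List.length_cons] at h
    simp only [List.length_cons]
    omega
  · simp

def encode_for_xml_id_py_alt (text : String) : String :=
  String.ofList (PySem.Chars.join [] (pvBGo text.toList))

-- ===== PRECONDITION & SPEC =====
def Spec_encode_for_xml_id_py (text : String) (out : String) : Prop := out = encode_for_xml_id_py_alt text
instance (text : String) (out : String) : Decidable (Spec_encode_for_xml_id_py text out) := by unfold Spec_encode_for_xml_id_py; infer_instance

-- ===== CLAIM (what is proved, stated in full; the proofs are below) =====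
def Claim_equal_encode_for_xml_id_py : Prop := ∀ (text : String), Dom_encode_for_xml_id_py text → Spec_encode_for_xml_id_py text (encode_for_xml_id_py text)

-- ===== LEMMAS AND PROOFS =====

-- the per-character encoding both programs realize
def pvEnc (c : Char) : List Char := if pvAln c then [c] else 'x' :: pvHex4 c.toNat

-- A's loop appends one encoded piece per character: it is the map of its per-character encoding.
lemma pv_foldl_append_map {α β : Type} (p : α → Prop) [DecidablePred p] (g h : α → β) :
    ∀ (l : List α) (acc : List β),
      l.foldl (fun acc x => if p x then acc ++ [g x] else acc ++ [h x]) acc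
        = acc ++ l.map (fun x => if p x then g x else h x) := by
  intro l
  induction l with
  | nil => simp
  | cons c cs ih =>
      intro acc
      by_cases hp : p c <;> simp [List.foldl, ih, hp]

set_option maxRecDepth 10000 in
-- A's range test agrees with pvAln on every character (checked code by code; Dom gives c < 128)
lemma pv_char_eq : ∀ n : Nat, n < 128 →
    ((('a' ≤ Char.ofNat n ∧ Char.ofNat n ≤ 'z') ∨ ('A' ≤ Char.ofNat n ∧ Char.ofNat n ≤ 'Z') ∨
      ('0' ≤ Char.ofNat n ∧ Char.ofNat n ≤ '9')) ↔ pvAln (Char.ofNat n) = true) := by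
  decide

-- B's run scanner flattens to the same per-character map
lemma pvBGo_join : ∀ l : List Char, (pvBGo l).flatten = (l.map pvEnc).flatten := by
  intro l
  induction l using pvBGo.induct with
  | case1 => simp [pvBGo]
  | case2 c cs hrun ih =>
      have hc : pvAln c = true := by
        cases h : pvAln c with
        | true => rfl
        | false => simp [h] at hrun
      rw [pvBGo, if_pos hrun]
      have hsplit : (c :: cs) = List.takeWhile pvAln (c :: cs) ++ List.dropWhile pvAln (c :: cs) :=
        (List.takeWhile_append_dropWhile (p := pvAln) (l := c :: cs)).symm
      have hrunmap : ((List.takeWhile pvAln (c :: cs)).map pvEnc).flatten = List.takeWhile pvAln (c :: cs) := by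
        have hall : ∀ x ∈ List.takeWhile pvAln (c :: cs), pvAln x = true := fun x hx =>
          List.mem_takeWhile_imp hx
        generalize List.takeWhile pvAln (c :: cs) = run at hall
        induction run with
        | nil => simp
        | cons r rs ihr =>
            have := hall r (by simp)
            simp [pvEnc, this, ihr (fun x hx => hall x (List.mem_cons_of_mem _ hx))]
      calc (List.takeWhile pvAln (c :: cs) :: pvBGo (List.dropWhile pvAln (c :: cs))).flatten
          = List.takeWhile pvAln (c :: cs) ++ ((List.dropWhile pvAln (c :: cs)).map pvEnc).flatten := by
            simp [ih]
        _ = ((List.takeWhile pvAln (c :: cs)).map pvEnc).flatten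
              ++ ((List.dropWhile pvAln (c :: cs)).map pvEnc).flatten := by rw [hrunmap]
        _ = ((c :: cs).map pvEnc).flatten := by rw [← List.flatten_append, ← List.map_append, ← hsplit]
  | case3 c cs hrun ih =>
      have hc : pvAln c = false := by
        cases h : pvAln c with
        | false => rfl
        | true => simp [h] at hrun
      rw [pvBGo, if_neg hrun]
      simp [ih, pvEnc, hc]

-- join with empty separator is flatten
lemma pv_join_nil (ps : List (List Char)) : PySem.Chars.join [] ps = ps.flatten := by
  induction ps with
  | nil => simp [PySem.Chars.join_nil]
  | cons p ps ih =>
      cases ps with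
      | nil => simp [PySem.Chars.join_singleton]
      | cons q qs =>
          rw [PySem.Chars.join_cons_cons]
          simp [ih]

-- ===== VERDICT (by name: the statement is the Claim_ definition above) =====
theorem encode_for_xml_id_py_spec : Claim_equal_encode_for_xml_id_py := by
  intro text hdom
  unfold Spec_encode_for_xml_id_py encode_for_xml_id_py encode_for_xml_id_py_alt
  simp only []
  rw [pv_foldl_append_map, pv_join_nil, pv_join_nil, pvBGo_join, List.nil_append]
  refine congrArg _ (congrArg _ (List.map_congr_left ?_))
  intro c hc
  have hdc : pvDomChar c = true := List.all_eq_true.mp hdom c hc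
  have hlt : c.toNat < 128 := by
    simp [pvDomChar] at hdc
    omega
  have h2 := pv_char_eq c.toNat hlt
  rw [Char.ofNat_toNat] at h2
  unfold pvEnc
  by_cases h : pvAln c = true
  · simp [h, h2.mpr h]
  · have hb : pvAln c = false := by revert h; cases pvAln c <;> simp
    simp [hb]
    intro hcond
    exact absurd (h2.mp hcond) (by simp [hb])
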